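-- pv_equiv track=rewrite | github.com/neil90/spark-nyblog-mllib-stream | features.py | question_headline
-- ===== SOURCE A (Python) =====
-- def question_headline( headline):
-- 	keywords = [
-- 		'?', 'should', 'can', 'if',
-- 		'is', 'would', 'why', 'how',
-- 		'when', 'where'
-- 		]
--
-- 	if any(word in headline for word in keywords):
-- 		return 1
-- 	else:
-- 		return 0
-- ===== SOURCE B (Python) =====
-- def question_headline(headline):
--     keywords = ('?', 'should', 'can', 'if',
--                 'is', 'would', 'why', 'how',
--                 'when', 'where')
--     # single left-to-right scan: at each position test whether any keyword starts there
--     for i in range(len(headline)):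
--         if headline.startswith(keywords, i):
--             return 1
--     return 0
-- ===== Notes on version B (the rewrite author's own statement) =====
-- stated objective: alternative
-- what changed: Replaces the per-keyword substring membership scans with one left-to-right scan over the headline that tests all keywords as prefixes at each position via a single tuple-argument startswith call.
import Mathlib
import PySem

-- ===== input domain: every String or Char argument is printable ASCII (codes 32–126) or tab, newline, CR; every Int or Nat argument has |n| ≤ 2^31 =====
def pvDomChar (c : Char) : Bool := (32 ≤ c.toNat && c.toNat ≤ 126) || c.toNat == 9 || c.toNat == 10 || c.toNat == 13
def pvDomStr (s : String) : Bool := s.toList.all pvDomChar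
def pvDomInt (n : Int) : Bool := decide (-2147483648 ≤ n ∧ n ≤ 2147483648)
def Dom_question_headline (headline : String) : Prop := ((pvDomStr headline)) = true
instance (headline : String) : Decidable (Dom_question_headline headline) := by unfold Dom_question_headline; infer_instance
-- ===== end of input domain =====

-- B replaces the per-keyword substring scans with a single left-to-right scan that
-- tests all keywords as prefixes at each position (alternative decomposition, same cost).


-- ===== PORT A =====
def qhKeywordsA : List String :=
  ["?", "should", "can", "if",
   "is", "would", "why", "how",
   "when", "where"]

def question_headline (headline : String) : Int :=
  if qhKeywordsA.any (fun word => PySem.Str.isIn word headline) then 1 else 0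

-- ===== PORT B =====
def qhKeywordsB : List String :=
  ["?", "should", "can", "if",
   "is", "would", "why", "how",
   "when", "where"]

-- the scan over positions i = 0,1,… of Source B, realised as recursion on the suffixes
def qhScan : List Char → Int
  | [] => 0
  | c :: t =>
    if qhKeywordsB.any (fun w => PySem.Chars.startswith (c :: t) w.toList) then 1
    else qhScan t

def question_headline_alt (headline : String) : Int :=
  qhScan headline.toList

-- ===== PRECONDITION & SPEC =====
def Spec_question_headline (headline : String) (out : Int) : Prop := out = question_headline_alt headline
instance (headline : String) (out : Int) : Decidable (Spec_question_headline headline out) := by unfold Spec_question_headline; infer_instance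

-- ===== CLAIM (what is proved, stated in full; the proofs are below) =====
def Claim_equal_question_headline : Prop := ∀ (headline : String), Dom_question_headline headline → Spec_question_headline headline (question_headline headline)

-- ===== LEMMAS AND PROOFS =====
lemma qh_isIn_cons (w : List Char) (c : Char) (t : List Char) :
    PySem.Chars.isIn w (c :: t)
      = (PySem.Chars.startswith (c :: t) w || PySem.Chars.isIn w t) := by
  rw [Bool.eq_iff_iff]
  simp [PySem.Chars.isIn_iff_infix, PySem.Chars.startswith_iff, List.infix_cons_iff]

lemma qhScan_eq (s : List Char) :
    qhScan s = if qhKeywordsB.any (fun w => PySem.Chars.isIn w.toList s) then 1 else 0 := by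
  induction s with
  | nil => decide
  | cons c t ih =>
    simp only [qhScan, ih, qh_isIn_cons]
    by_cases h : qhKeywordsB.any (fun w => PySem.Chars.startswith (c :: t) w.toList) = true
    · rw [if_pos h, if_pos]
      rcases List.any_eq_true.mp h with ⟨w, hw, hsw⟩
      exact List.any_eq_true.mpr ⟨w, hw, by simp [hsw]⟩
    · rw [if_neg h]
      have : (qhKeywordsB.any fun w =>
          PySem.Chars.startswith (c :: t) w.toList || PySem.Chars.isIn w.toList t)
          = qhKeywordsB.any (fun w => PySem.Chars.isIn w.toList t) := by
        rw [Bool.eq_iff_iff]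
        simp only [List.any_eq_true, Bool.or_eq_true]
        constructor
        · rintro ⟨w, hw, hsw | hin⟩
          · exact absurd (List.any_eq_true.mpr ⟨w, hw, hsw⟩) h
          · exact ⟨w, hw, hin⟩
        · rintro ⟨w, hw, hin⟩; exact ⟨w, hw, Or.inr hin⟩
      rw [this]

-- ===== VERDICT (by name: the statement is the Claim_ definition above) =====
theorem question_headline_spec : Claim_equal_question_headline := by
  intro headline _
  unfold Spec_question_headline question_headline question_headline_alt
  rw [qhScan_eq]
  simp [qhKeywordsA, qhKeywordsB]
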